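-- pv_equiv track=rewrite | github.com/katyamineeva/fcs | sem1/lesson6/A1504.py | checkNotation
-- ===== SOURCE A (Python) =====
-- def checkNotation(notation, radix):
-- 	if notation[0] == '-':
-- 		return False
--
-- 	allowedSymb = []
-- 	left = ord('0')
-- 	right = min(ord('9') + 1, ord('0') + radix)
-- 	for i in range(left, right):
-- 		allowedSymb.append(chr(i))
--
-- 	left = ord('A')
-- 	right = min(ord('Z') + 1, ord('A') + radix - 10)
-- 	for i in range(left, right):
-- 		allowedSymb.append(chr(i))
-- 	allowedSymb = set(allowedSymb)
--
-- 	for i in notation: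
-- 		if i not in allowedSymb:
-- 			return False
-- 	return True
-- ===== SOURCE B (Python) =====
-- def checkNotation(notation, radix):
--     for c in notation:
--         if '0' <= c <= '9':
--             v = ord(c) - ord('0')
--         elif 'A' <= c <= 'Z':
--             v = ord(c) - ord('A') + 10
--         else:
--             return False
--         if v >= radix:
--             return False
--     return True
-- ===== Notes on version B (the rewrite author's own statement) =====
-- stated objective: simpler
-- what changed: B drops the allowed-set table (and the redundant leading '-' guard) and validates in one pass by computing each character's digit value arithmetically and comparing it to radix.
import Mathlib
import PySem

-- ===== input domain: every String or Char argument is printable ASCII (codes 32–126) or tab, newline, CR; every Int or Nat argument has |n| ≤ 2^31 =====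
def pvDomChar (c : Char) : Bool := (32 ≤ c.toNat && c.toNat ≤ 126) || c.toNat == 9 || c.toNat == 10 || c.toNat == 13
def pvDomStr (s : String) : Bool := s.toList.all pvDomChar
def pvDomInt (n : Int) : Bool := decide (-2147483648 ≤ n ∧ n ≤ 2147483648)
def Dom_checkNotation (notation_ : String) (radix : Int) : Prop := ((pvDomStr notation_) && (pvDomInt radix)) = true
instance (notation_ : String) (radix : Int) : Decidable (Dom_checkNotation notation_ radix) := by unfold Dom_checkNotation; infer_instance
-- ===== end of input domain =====

-- B replaces A's allowed-character set (built with two range loops) by a single pass that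
-- computes each character's digit value arithmetically; objective: simpler.

-- ===== PORT A =====
def checkNotation (notation_ : String) (radix : Int) : Bool :=
  match PySem.Str.pyGet? notation_ 0 with
  | none => false   -- Python raises IndexError here; excluded by Pre_checkNotation
  | some c0 =>
    if c0 = '-' then false
    else
      -- for i in range(ord('0'), min(ord('9')+1, ord('0')+radix)): allowedSymb.append(chr(i))
      let allowed1 := (PySem.List.pyRange 48 (min 58 (48 + radix)) 1).foldl
        (fun acc i => acc ++ [Char.ofNat i.toNat]) []
      -- for i in range(ord('A'), min(ord('Z')+1, ord('A')+radix-10)): allowedSymb.append(chr(i))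
      let allowed2 := (PySem.List.pyRange 65 (min 91 (65 + radix - 10)) 1).foldl
        (fun acc i => acc ++ [Char.ofNat i.toNat]) allowed1
      let allowedSymb := PySem.Set.ofList allowed2
      -- for i in notation: if i not in allowedSymb: return False / return True
      notation_.toList.all (fun ch => PySem.Set.contains allowedSymb ch)

-- ===== PORT B =====
def checkNotationAltGo (radix : Int) : List Char → Bool
  | [] => true
  | c :: rest =>
    if '0' ≤ c ∧ c ≤ '9' then
      if (c.toNat : Int) - 48 ≥ radix then false else checkNotationAltGo radix rest
    else if 'A' ≤ c ∧ c ≤ 'Z' then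
      if (c.toNat : Int) - 65 + 10 ≥ radix then false else checkNotationAltGo radix rest
    else false

def checkNotation_alt (notation_ : String) (radix : Int) : Bool :=
  checkNotationAltGo radix notation_.toList

-- ===== PRECONDITION & SPEC =====
-- Pre_ excludes only the empty string, on which A raises IndexError (notation[0]); B returns True there.
def Pre_checkNotation (notation_ : String) (radix : Int) : Prop := notation_ ≠ ""
instance (notation_ : String) (radix : Int) : Decidable (Pre_checkNotation notation_ radix) := by
  unfold Pre_checkNotation; infer_instance

def pvWitness_checkNotation : String × Int := ("1A", 16)

def Spec_checkNotation (notation_ : String) (radix : Int) (out : Bool) : Prop :=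
  out = checkNotation_alt notation_ radix
instance (notation_ : String) (radix : Int) (out : Bool) : Decidable (Spec_checkNotation notation_ radix out) := by
  unfold Spec_checkNotation; infer_instance

-- ===== CLAIM (what is proved, stated in full; the proofs are below) =====
def Claim_equal_checkNotation : Prop := ∀ (notation_ : String) (radix : Int),
  Dom_checkNotation notation_ radix → Pre_checkNotation notation_ radix →
  Spec_checkNotation notation_ radix (checkNotation notation_ radix)

-- ===== LEMMAS AND PROOFS =====

-- per-character acceptance predicate that both ports boil down to
def pvAccept (radix : Int) (c : Char) : Bool :=
  if '0' ≤ c ∧ c ≤ '9' then !decide ((c.toNat : Int) - 48 ≥ radix)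
  else if 'A' ≤ c ∧ c ≤ 'Z' then !decide ((c.toNat : Int) - 65 + 10 ≥ radix)
  else false

theorem altGo_eq_all (radix : Int) (l : List Char) :
    checkNotationAltGo radix l = l.all (pvAccept radix) := by
  induction l with
  | nil => rfl
  | cons c rest ih =>
      simp only [checkNotationAltGo, List.all_cons, pvAccept]
      split_ifs with h1 h2 h3 <;> simp_all

theorem foldl_append_singleton {α β : Type} (f : α → β) (l : List α) (init : List β) :
    l.foldl (fun acc i => acc ++ [f i]) init = init ++ l.map f := by
  induction l generalizing init with
  | nil => simp
  | cons x xs ih => simp [ih]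

theorem toNat_ofNat_valid (n : Nat) (h : Nat.isValidChar n) : (Char.ofNat n).toNat = n := by
  simp [Char.ofNat, h, Char.toNat, Char.ofNatAux]

theorem mem_map_chr (a b : Int) (ha : 0 ≤ a) (hb : b ≤ 1000) (c : Char) :
    (c ∈ (PySem.List.pyRange a b 1).map (fun i => Char.ofNat i.toNat)) ↔
      (a ≤ (c.toNat : Int) ∧ (c.toNat : Int) < b) := by
  constructor
  · rintro h
    rcases List.mem_map.1 h with ⟨i, hi, rfl⟩
    rw [PySem.List.mem_pyRange_one] at hi
    have hvalid : Nat.isValidChar i.toNat := Or.inl (by omega)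
    rw [toNat_ofNat_valid _ hvalid]; omega
  · rintro ⟨h1, h2⟩
    refine List.mem_map.2 ⟨(c.toNat : Int), ?_, ?_⟩
    · rw [PySem.List.mem_pyRange_one]; exact ⟨h1, h2⟩
    · simp [Char.ofNat_toNat]

theorem char_le_iff (c d : Char) : (c ≤ d) ↔ c.toNat ≤ d.toNat := by
  rw [Char.le_def, UInt32.le_iff_toNat_le]; rfl

theorem contains_eq_accept (radix : Int) (c : Char) :
    PySem.Set.contains (PySem.Set.ofList
      ((PySem.List.pyRange 48 (min 58 (48 + radix)) 1).map (fun i => Char.ofNat i.toNat) ++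
       (PySem.List.pyRange 65 (min 91 (65 + radix - 10)) 1).map (fun i => Char.ofNat i.toNat))) c
    = pvAccept radix c := by
  have hmem : (c ∈ PySem.Set.ofList
      ((PySem.List.pyRange 48 (min 58 (48 + radix)) 1).map (fun i => Char.ofNat i.toNat) ++
       (PySem.List.pyRange 65 (min 91 (65 + radix - 10)) 1).map (fun i => Char.ofNat i.toNat))) ↔
      ((48 ≤ (c.toNat : Int) ∧ (c.toNat : Int) < min 58 (48 + radix)) ∨
       (65 ≤ (c.toNat : Int) ∧ (c.toNat : Int) < min 91 (65 + radix - 10))) := by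
    rw [PySem.Set.mem_ofList, List.mem_append,
        mem_map_chr 48 _ (by omega) (by omega), mem_map_chr 65 _ (by omega) (by omega)]
  have hC : PySem.Set.contains (PySem.Set.ofList
      ((PySem.List.pyRange 48 (min 58 (48 + radix)) 1).map (fun i => Char.ofNat i.toNat) ++
       (PySem.List.pyRange 65 (min 91 (65 + radix - 10)) 1).map (fun i => Char.ofNat i.toNat))) c
      = decide ((48 ≤ (c.toNat : Int) ∧ (c.toNat : Int) < min 58 (48 + radix)) ∨
                (65 ≤ (c.toNat : Int) ∧ (c.toNat : Int) < min 91 (65 + radix - 10))) := by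
    rw [PySem.Set.contains_eq_decide]; exact decide_eq_decide.mpr hmem
  rw [hC]
  unfold pvAccept
  have hd0 : ('0' ≤ c ∧ c ≤ '9') ↔ (48 ≤ c.toNat ∧ c.toNat ≤ 57) := by
    rw [char_le_iff, char_le_iff]; exact Iff.rfl
  have hdA : ('A' ≤ c ∧ c ≤ 'Z') ↔ (65 ≤ c.toNat ∧ c.toNat ≤ 90) := by
    rw [char_le_iff, char_le_iff]; exact Iff.rfl
  split_ifs with hA hB
  · rw [hd0] at hA; rw [← decide_not, decide_eq_decide]; omega
  · rw [hd0] at hA; rw [hdA] at hB; rw [← decide_not, decide_eq_decide]; omega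
  · rw [hd0] at hA; rw [hdA] at hB
    simp only [decide_eq_false_iff_not]; omega

-- ===== VERDICT (by name: the statement is the Claim_ definition above) =====
theorem checkNotation_spec : Claim_equal_checkNotation := by
  intro notation_ radix _ hpre
  unfold Spec_checkNotation checkNotation checkNotation_alt
  have hne : notation_.toList ≠ [] := by
    have : notation_ ≠ "" := hpre
    simp [this]
  obtain ⟨c0, rest, hl⟩ : ∃ c0 rest, notation_.toList = c0 :: rest := by
    cases h : notation_.toList with
    | nil => exact absurd h hne
    | cons a t => exact ⟨a, t, rfl⟩
  have hget : PySem.Str.pyGet? notation_ 0 = some c0 := by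
    simp [PySem.Str.pyGet?, hl]
  by_cases hdash : c0 = '-'
  · subst hdash
    simp only [hget, hl]
    simp [checkNotationAltGo]
  · simp only [hget]
    rw [if_neg hdash]
    simp only [foldl_append_singleton, List.nil_append, altGo_eq_all, contains_eq_accept]
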